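-- pv_equiv track=rewrite | github.com/liuguangxi/defi_turing | Codes/dt183.py | is_valid_line
-- ===== SOURCE A (Python) =====
-- def is_valid_line(n, length, allowed_seven_indices):
--     """
--     Checks if a number n has a specific decimal representation.
--     - length: the required number of digits.
--     - allowed_seven_indices: indices (0-based) where the digit '7' is allowed (and required).
--     - all other indices must not contain the digit '7'.
--     """
--     s = str(n)
--     if len(s) != length:
--         return False
--     for i, char in enumerate(s):
--         if char == '7':
--             if i not in allowed_seven_indices:
--                 return False
--         else:
--             if i in allowed_seven_indices:
--                 return False
--     return True
-- ===== SOURCE B (Python) =====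
-- def is_valid_line(n, length, allowed_seven_indices):
--     s = str(n)
--     if len(s) != length:
--         return False
--     seven = {i for i, c in enumerate(s) if c == '7'}
--     required = {i for i in allowed_seven_indices if 0 <= i < length}
--     return seven == required
-- ===== Notes on version B (the rewrite author's own statement) =====
-- stated objective: simpler
-- what changed: Replaces the per-character branch-and-early-return loop by building the set of indices holding '7' and the set of in-range allowed indices, then comparing the two sets for equality.
import Mathlib
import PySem

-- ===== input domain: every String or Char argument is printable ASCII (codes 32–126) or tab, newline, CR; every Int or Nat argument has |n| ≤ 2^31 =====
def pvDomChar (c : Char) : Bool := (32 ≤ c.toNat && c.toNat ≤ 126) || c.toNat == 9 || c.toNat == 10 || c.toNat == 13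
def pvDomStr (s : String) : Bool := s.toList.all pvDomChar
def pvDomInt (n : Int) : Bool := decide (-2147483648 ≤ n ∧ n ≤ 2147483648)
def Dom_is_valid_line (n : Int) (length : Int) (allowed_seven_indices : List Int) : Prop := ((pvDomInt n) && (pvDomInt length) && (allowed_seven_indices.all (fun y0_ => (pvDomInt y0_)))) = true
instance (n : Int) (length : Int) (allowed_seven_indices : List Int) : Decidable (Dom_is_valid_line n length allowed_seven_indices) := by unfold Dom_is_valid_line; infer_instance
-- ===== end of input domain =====

-- B replaces A's per-character branch-and-early-return loop by two set constructions
-- ('7'-index set vs in-range allowed set) compared for equality (objective: simpler).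

-- ===== PORT A =====
-- the for-loop with early returns, step for step
def pvLoopA (allowed : List Int) : List (Int × Char) → Bool
  | [] => true
  | (i, c) :: rest =>
    if c = '7' then
      if !(allowed.contains i) then false else pvLoopA allowed rest
    else
      if allowed.contains i then false else pvLoopA allowed rest

def is_valid_line (n : Int) (length : Int) (allowed_seven_indices : List Int) : Bool :=
  let s := PySem.Int.toChars n
  if (s.length : Int) ≠ length then false
  else pvLoopA allowed_seven_indices (PySem.List.enumerate s 0)

-- ===== PORT B =====
def is_valid_line_alt (n : Int) (length : Int) (allowed_seven_indices : List Int) : Bool :=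
  let s := PySem.Int.toChars n
  if (s.length : Int) ≠ length then false
  else
    let seven : PySem.Set Int :=
      PySem.Set.ofList (((PySem.List.enumerate s 0).filter (fun p => p.2 == '7')).map (·.1))
    let required : PySem.Set Int :=
      PySem.Set.ofList (allowed_seven_indices.filter (fun i => decide (0 ≤ i) && decide (i < length)))
    PySem.Set.equal seven required

-- ===== PRECONDITION & SPEC =====
def Spec_is_valid_line (n : Int) (length : Int) (allowed_seven_indices : List Int) (out : Bool) : Prop := out = is_valid_line_alt n length allowed_seven_indices
instance (n : Int) (length : Int) (allowed_seven_indices : List Int) (out : Bool) : Decidable (Spec_is_valid_line n length allowed_seven_indices out) := by unfold Spec_is_valid_line; infer_instance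

-- ===== CLAIM (what is proved, stated in full; the proofs are below) =====
def Claim_equal_is_valid_line : Prop := ∀ (n : Int) (length : Int) (allowed_seven_indices : List Int), Dom_is_valid_line n length allowed_seven_indices → Spec_is_valid_line n length allowed_seven_indices (is_valid_line n length allowed_seven_indices)

-- ===== LEMMAS AND PROOFS =====
theorem pvLoopA_iff (allowed : List Int) (l : List (Int × Char)) :
    pvLoopA allowed l = true ↔ ∀ p ∈ l, (p.2 = '7' ↔ p.1 ∈ allowed) := by
  induction l with
  | nil => simp [pvLoopA]
  | cons p rest ih =>
    obtain ⟨i, c⟩ := p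
    by_cases hc : c = '7' <;> by_cases hm : i ∈ allowed <;>
      simp [pvLoopA, hc, hm, ih]

theorem is_valid_line_spec : Claim_equal_is_valid_line := by
  intro n length allowed _
  unfold Spec_is_valid_line is_valid_line is_valid_line_alt
  set s := PySem.Int.toChars n with hs
  by_cases hlen : (s.length : Int) ≠ length
  · simp [hlen]
  · simp only [ne_eq, not_not] at hlen
    simp only [hlen, ne_eq, not_true_eq_false, if_false]
    rw [Bool.eq_iff_iff, pvLoopA_iff, PySem.Set.equal_iff]
    constructor
    · intro h x
      simp only [PySem.Set.mem_ofList, List.mem_map, List.mem_filter]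
      constructor
      · rintro ⟨⟨i, c⟩, ⟨hp, hc7⟩, rfl⟩
        simp only [beq_iff_eq] at hc7
        obtain ⟨k, hk, hpk⟩ := (PySem.List.mem_enumerate_iff _ _ _).mp hp
        have := (h _ hp).mp hc7
        cases hpk
        refine ⟨this, ?_⟩
        simp only [Bool.and_eq_true, decide_eq_true_eq]
        exact ⟨by positivity, by omega⟩
      · intro hx
        obtain ⟨hmem, hrange⟩ := hx
        simp only [Bool.and_eq_true, decide_eq_true_eq] at hrange
        obtain ⟨h0, hlt⟩ := hrange
        have hklt : x.toNat < s.length := by omega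
        have hp : ((x.toNat : Int), s[x.toNat]) ∈ PySem.List.enumerate s 0 := by
          rw [PySem.List.mem_enumerate_iff]
          exact ⟨x.toNat, hklt, by simp⟩
        have hx' : (x.toNat : Int) = x := by omega
        rw [hx'] at hp
        have hc7 : s[x.toNat] = '7' := (h _ hp).mpr hmem
        exact ⟨(x, s[x.toNat]), ⟨hp, by simp [hc7]⟩, rfl⟩
    · intro h p hp
      obtain ⟨k, hk, hpk⟩ := (PySem.List.mem_enumerate_iff _ _ _).mp hp
      subst hpk
      simp only [zero_add]
      constructor
      · intro hc7
        have : (k : Int) ∈ PySem.Set.ofList (((PySem.List.enumerate s 0).filter (fun p => p.2 == '7')).map (·.1)) := by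
          simp only [PySem.Set.mem_ofList, List.mem_map, List.mem_filter]
          exact ⟨((k : Int), s[k]), ⟨by simpa using hp, by simp [hc7]⟩, rfl⟩
        have := (h _).mp this
        simp only [PySem.Set.mem_ofList] at this
        exact (List.mem_filter.mp this).1
      · intro hmem
        have hreq : (k : Int) ∈ PySem.Set.ofList (allowed.filter (fun i => decide (0 ≤ i) && decide (i < length))) := by
          simp only [PySem.Set.mem_ofList, List.mem_filter, Bool.and_eq_true, decide_eq_true_eq]
          exact ⟨hmem, by positivity, by omega⟩
        have := (h _).mpr hreq
        simp only [PySem.Set.mem_ofList, List.mem_map, List.mem_filter] at this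
        obtain ⟨⟨j, c⟩, ⟨hpj, hc7⟩, hfst⟩ := this
        obtain ⟨k', hk', hpk'⟩ := (PySem.List.mem_enumerate_iff _ _ _).mp hpj
        simp only at hfst
        cases hpk'
        simp only [zero_add] at hfst
        have : k' = k := by omega
        subst this
        simpa using hc7
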